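-- pv_equiv track=rewrite | github.com/wangzhx123/alpha-analyzer | generate_sample_data.py | generate_vpos_data
-- ===== SOURCE A (Python) =====
-- def generate_vpos_data(actual_positions, pm_tickers, time_intervals):
--     """Generate PM virtual positions by summing trader positions for same ticker"""
--     data = []
--
--     for ti in time_intervals:
--         for pm_id, tickers in pm_tickers.items():
--             for ticker in tickers:
--                 # Sum all trader positions for this ticker
--                 total_trader_pos = 0
--                 for trader_id, positions in actual_positions.items():
--                     total_trader_pos += positions.get(ticker, 0)
--
--                 # PM vpos = sum of trader positions (exactly equal)
--                 vpos = total_trader_pos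
--
--                 data.append([
--                     "VposResEv", pm_id, str(ti), ticker, str(vpos),
--                     str(vpos), "0", str(vpos)
--                 ])
--
--     return data
-- ===== SOURCE B (Python) =====
-- def generate_vpos_data(actual_positions, pm_tickers, time_intervals):
--     """Generate PM virtual positions by summing trader positions for same ticker"""
--     # Stage 1: per-ticker totals across all traders, computed once.
--     totals = {}
--     for positions in actual_positions.values():
--         for ticker, pos in positions.items():
--             totals[ticker] = totals.get(ticker, 0) + pos
--
--     # Stage 2: one (pm_id, ticker, vpos-string) block per row position, computed once.
--     blocks = [(pm_id, ticker, str(totals.get(ticker, 0)))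
--               for pm_id, tickers in pm_tickers.items()
--               for ticker in tickers]
--
--     # Stage 3: replicate the block per time interval.
--     return [["VposResEv", pm_id, str(ti), ticker, v, v, "0", v]
--             for ti in time_intervals
--             for pm_id, ticker, v in blocks]
-- ===== Notes on version B (the rewrite author's own statement) =====
-- stated objective: faster
-- what changed: B is staged: it precomputes per-ticker trader-position totals once into a dict and a per-(pm,ticker) row block once, then builds the output by mapping the block over the time intervals, replacing A's inner rescan of all traders for every (time, pm, ticker) row.
import Mathlib
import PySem

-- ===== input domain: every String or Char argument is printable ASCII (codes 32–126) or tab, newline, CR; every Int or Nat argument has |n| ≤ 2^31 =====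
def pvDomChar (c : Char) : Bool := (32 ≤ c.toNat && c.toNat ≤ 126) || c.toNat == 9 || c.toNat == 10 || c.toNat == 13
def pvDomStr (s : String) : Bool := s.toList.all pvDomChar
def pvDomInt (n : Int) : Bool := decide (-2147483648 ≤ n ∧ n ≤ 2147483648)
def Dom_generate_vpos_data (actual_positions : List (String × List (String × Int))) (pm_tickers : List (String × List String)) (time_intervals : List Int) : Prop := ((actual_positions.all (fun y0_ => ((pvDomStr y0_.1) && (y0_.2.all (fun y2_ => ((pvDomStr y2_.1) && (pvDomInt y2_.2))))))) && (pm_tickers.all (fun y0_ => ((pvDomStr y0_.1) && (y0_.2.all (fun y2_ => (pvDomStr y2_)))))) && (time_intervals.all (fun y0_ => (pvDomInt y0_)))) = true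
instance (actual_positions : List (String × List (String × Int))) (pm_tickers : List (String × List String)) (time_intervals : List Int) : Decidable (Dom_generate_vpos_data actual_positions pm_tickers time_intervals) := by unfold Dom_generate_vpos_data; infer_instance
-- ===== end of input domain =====

-- B stages the work: per-ticker totals once, one (pm, ticker, vpos) block once, then the
-- block mapped over each time interval — replacing A's per-row rescan of every trader.

-- ===== PORT A =====
def generate_vpos_data (actual_positions : List (String × List (String × Int))) (pm_tickers : List (String × List String)) (time_intervals : List Int) : List (List String) :=
  time_intervals.foldl (fun data ti =>
    pm_tickers.foldl (fun data pt =>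
      pt.2.foldl (fun data ticker =>
        let total_trader_pos : Int :=
          actual_positions.foldl (fun acc tp => acc + (PySem.Dict.mk tp.2).getD ticker 0) 0
        let vpos := total_trader_pos
        data ++ [["VposResEv", pt.1, PySem.Int.toStr ti, ticker, PySem.Int.toStr vpos,
                  PySem.Int.toStr vpos, "0", PySem.Int.toStr vpos]]) data) data) []

-- ===== PORT B =====
def generate_vpos_data_alt (actual_positions : List (String × List (String × Int))) (pm_tickers : List (String × List String)) (time_intervals : List Int) : List (List String) :=
  let totals : PySem.Dict String Int :=
    actual_positions.foldl (fun d tp =>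
      tp.2.foldl (fun d p => d.insert p.1 (d.getD p.1 0 + p.2)) d) PySem.Dict.empty
  let blocks : List (String × String × String) :=
    pm_tickers.flatMap (fun pt =>
      pt.2.map (fun ticker => (pt.1, ticker, PySem.Int.toStr (totals.getD ticker 0))))
  time_intervals.flatMap (fun ti =>
    blocks.map (fun b => ["VposResEv", b.1, PySem.Int.toStr ti, b.2.1, b.2.2, b.2.2, "0", b.2.2]))

-- ===== PRECONDITION & SPEC =====
-- Pre_ excludes only association lists in which one trader's positions list has duplicate
-- ticker keys: such lists represent no Python dict (A's positions arguments are dicts), so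
-- no input A runs on is excluded.
def Pre_generate_vpos_data (actual_positions : List (String × List (String × Int))) (pm_tickers : List (String × List String)) (time_intervals : List Int) : Prop :=
  ∀ tp ∈ actual_positions, (tp.2.map Prod.fst).Nodup
instance (actual_positions : List (String × List (String × Int))) (pm_tickers : List (String × List String)) (time_intervals : List Int) : Decidable (Pre_generate_vpos_data actual_positions pm_tickers time_intervals) := by unfold Pre_generate_vpos_data; infer_instance

def pvWitness_generate_vpos_data : (List (String × List (String × Int))) × (List (String × List String)) × List Int :=
  ([("t1", [("AAPL", 3), ("MSFT", -2)]), ("t2", [("AAPL", 4)])], [("pm1", ["AAPL", "MSFT", "GOOG"])], [1, 2])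

def Spec_generate_vpos_data (actual_positions : List (String × List (String × Int))) (pm_tickers : List (String × List String)) (time_intervals : List Int) (out : List (List String)) : Prop := out = generate_vpos_data_alt actual_positions pm_tickers time_intervals
instance (actual_positions : List (String × List (String × Int))) (pm_tickers : List (String × List String)) (time_intervals : List Int) (out : List (List String)) : Decidable (Spec_generate_vpos_data actual_positions pm_tickers time_intervals out) := by unfold Spec_generate_vpos_data; infer_instance

-- ===== CLAIM (what is proved, stated in full; the proofs are below) =====
def Claim_equal_generate_vpos_data : Prop := ∀ (actual_positions : List (String × List (String × Int))) (pm_tickers : List (String × List String)) (time_intervals : List Int), Dom_generate_vpos_data actual_positions pm_tickers time_intervals → Pre_generate_vpos_data actual_positions pm_tickers time_intervals → Spec_generate_vpos_data actual_positions pm_tickers time_intervals (generate_vpos_data actual_positions pm_tickers time_intervals)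

-- ===== LEMMAS AND PROOFS =====

-- A fold that never touches key t leaves the lookup at t unchanged.
theorem getD_foldl_insert_of_ne (p : List (String × Int)) (d : PySem.Dict String Int) (t : String)
    (h : ∀ q ∈ p, q.1 ≠ t) :
    (p.foldl (fun d q => d.insert q.1 (d.getD q.1 0 + q.2)) d).getD t 0 = d.getD t 0 := by
  induction p generalizing d with
  | nil => rfl
  | cons q rest ih =>
    simp only [List.foldl_cons]
    rw [ih _ (fun r hr => h r (List.mem_cons_of_mem _ hr)), PySem.Dict.getD_insert,
        if_neg (fun e => h q List.mem_cons_self e.symm)]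

-- One trader's positions list (unique keys) adds exactly its first-match lookup.
theorem getD_foldl_one (p : List (String × Int)) (d : PySem.Dict String Int) (t : String)
    (hnd : (p.map Prod.fst).Nodup) :
    (p.foldl (fun d q => d.insert q.1 (d.getD q.1 0 + q.2)) d).getD t 0
      = d.getD t 0 + (PySem.Dict.mk p).getD t 0 := by
  induction p generalizing d with
  | nil => simp [PySem.Dict.getD, PySem.Dict.get?]
  | cons q rest ih =>
    obtain ⟨qk, qv⟩ := q
    simp only [List.map_cons, List.nodup_cons] at hnd
    simp only [List.foldl_cons]
    by_cases ht : t = qk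
    · subst ht
      rw [getD_foldl_insert_of_ne _ _ _
            (fun r hr hrt => hnd.1 (by rw [← hrt]; exact List.mem_map_of_mem hr)),
          PySem.Dict.getD_insert, if_pos rfl]
      simp [PySem.Dict.getD_eq_get?_getD, PySem.Dict.get?_mk_cons]
    · have hbe : (qk == t) = false := by
        simp only [beq_eq_false_iff_ne]; exact fun e => ht e.symm
      rw [ih _ hnd.2, PySem.Dict.getD_insert, if_neg ht]
      simp [PySem.Dict.getD_eq_get?_getD, PySem.Dict.get?_mk_cons, hbe]

-- The whole totals dict: lookup at t = A's inner sum over all traders.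
theorem getD_totals (ap : List (String × List (String × Int))) (d : PySem.Dict String Int) (t : String)
    (hnd : ∀ tp ∈ ap, (tp.2.map Prod.fst).Nodup) :
    (ap.foldl (fun d tp => tp.2.foldl (fun d p => d.insert p.1 (d.getD p.1 0 + p.2)) d) d).getD t 0
      = d.getD t 0 + ap.foldl (fun acc tp => acc + (PySem.Dict.mk tp.2).getD t 0) 0 := by
  induction ap generalizing d with
  | nil => simp
  | cons tp rest ih =>
    simp only [List.foldl_cons]
    rw [ih _ (fun r hr => hnd r (List.mem_cons_of_mem _ hr)),
        getD_foldl_one _ _ _ (hnd tp (List.mem_cons_self))]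
    simp only [PySem.List.foldl_add (g := fun (tp : String × List (String × Int)) => (PySem.Dict.mk tp.2).getD t 0)]
    ring

-- flatten of a map into singletons is just a map
theorem flatten_map_singleton {α β : Type} (f : α → β) (l : List α) :
    (l.map (fun a => [f a])).flatten = l.map f := by
  induction l with
  | nil => rfl
  | cons a rest ih => simp [ih]

-- ===== VERDICT (by name: the statement is the Claim_ definition above) =====
theorem generate_vpos_data_spec : Claim_equal_generate_vpos_data := by
  intro ap pm ti _hdom hpre
  unfold Spec_generate_vpos_data generate_vpos_data generate_vpos_data_alt
  have htot : ∀ t : String,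
      ((ap.foldl (fun d tp => tp.2.foldl (fun d p => d.insert p.1 (d.getD p.1 0 + p.2)) d)
        PySem.Dict.empty).getD t 0)
      = ap.foldl (fun acc tp => acc + (PySem.Dict.mk tp.2).getD t 0) 0 := by
    intro t
    rw [getD_totals ap PySem.Dict.empty t hpre]
    simp
  -- flatten A's nested append-folds into flatMap/map form, then match B
  simp [List.map_map, htot, Function.comp_def, List.flatMap, flatten_map_singleton]
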